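-- pv_equiv track=rewrite | github.com/tylernotthomas/Sudoku-CNF-Encoder | sudoku.py | makeMapping
-- ===== SOURCE A (Python) =====
-- def makeMapping(N):
--   literal = 1
--   literalDict = {}
--   for i in range(1, N+1):
--     for j in range(1, N+1):
--       for k in range(1, N+1):
--         key = (i, j, k)
--         literalDict[key] = literal
--         literal = literal + 1
--   return literalDict
-- ===== SOURCE B (Python) =====
-- def makeMapping(N):
--   # Inverted direction: one flat loop over the literal numbers 1..N**3, decoding
--   # each literal's coordinates with divmod, instead of three nested coordinate
--   # loops threading a counter.  For N < 1, range(N**3) is empty, giving {}.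
--   literalDict = {}
--   for t in range(N ** 3):
--     q, k = divmod(t, N)
--     i, j = divmod(q, N)
--     literalDict[(i + 1, j + 1, k + 1)] = t + 1
--   return literalDict
-- ===== Notes on version B (the rewrite author's own statement) =====
-- stated objective: alternative
-- what changed: Replaces the three nested coordinate loops threading a mutable counter by one flat loop over the literal numbers 0..N^3-1 that decodes each literal's (i,j,k) coordinates with divmod.
import Mathlib
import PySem

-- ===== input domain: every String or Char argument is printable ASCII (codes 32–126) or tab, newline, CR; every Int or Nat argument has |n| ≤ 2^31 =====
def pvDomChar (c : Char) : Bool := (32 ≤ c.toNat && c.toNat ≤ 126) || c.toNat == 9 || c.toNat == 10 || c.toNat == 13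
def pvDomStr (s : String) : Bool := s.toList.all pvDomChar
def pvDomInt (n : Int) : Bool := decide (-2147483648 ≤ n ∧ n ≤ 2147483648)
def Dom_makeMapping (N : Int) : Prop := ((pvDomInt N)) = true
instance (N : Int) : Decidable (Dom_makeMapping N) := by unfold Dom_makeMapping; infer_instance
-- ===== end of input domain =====

-- B iterates once over the literal numbers 0..N^3-1 and decodes each literal's (i,j,k)
-- coordinates with divmod, instead of A's three nested coordinate loops threading a counter
-- (objective: alternative; same asymptotic cost).

-- ===== PORT A =====
-- Python dict (i,j,k) -> literal; items are flattened to 4-tuples for the required output type.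
def makeMapping (N : Int) : List (Int × Int × Int × Int) :=
  ((PySem.List.pyRange 1 (N + 1) 1).foldl (fun st i =>
      (PySem.List.pyRange 1 (N + 1) 1).foldl (fun st j =>
        (PySem.List.pyRange 1 (N + 1) 1).foldl
          (fun (st : PySem.Dict (Int × Int × Int) Int × Int) k =>
            (st.1.insert (i, j, k) st.2, st.2 + 1)) st) st)
      (PySem.Dict.empty, 1)).1.items.map (fun p => (p.1.1, p.1.2.1, p.1.2.2, p.2))

-- ===== PORT B =====
-- One loop over range(N**3); q,k = divmod(t,N); i,j = divmod(q,N); dict insert; items flattened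
-- to 4-tuples as above.  (divmod is only reached when the range is nonempty, i.e. N ≥ 1.)
def makeMapping_alt (N : Int) : List (Int × Int × Int × Int) :=
  ((PySem.List.pyRange 0 (N * N * N) 1).foldl
    (fun (d : PySem.Dict (Int × Int × Int) Int) t =>
      let q := PySem.Int.floordiv t N
      let k := PySem.Int.mod t N
      let i := PySem.Int.floordiv q N
      let j := PySem.Int.mod q N
      d.insert (i + 1, j + 1, k + 1) (t + 1)) PySem.Dict.empty).items.map
    (fun p => (p.1.1, p.1.2.1, p.1.2.2, p.2))

-- ===== PRECONDITION & SPEC =====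
def Spec_makeMapping (N : Int) (out : List (Int × Int × Int × Int)) : Prop := out = makeMapping_alt N
instance (N : Int) (out : List (Int × Int × Int × Int)) : Decidable (Spec_makeMapping N out) := by unfold Spec_makeMapping; infer_instance

-- ===== CLAIM (what is proved, stated in full; the proofs are below) =====
def Claim_equal_makeMapping : Prop := ∀ (N : Int), Dom_makeMapping N → Spec_makeMapping N (makeMapping N)

-- ===== LEMMAS AND PROOFS =====

/-- The elements of A's loop, in iteration order, each paired with the counter value it receives. -/
def pvNumbered {α : Type} (T : List α) (c : Int) : List (α × Int) :=
  match T with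
  | [] => []
  | t :: ts => (t, c) :: pvNumbered ts (c + 1)

/-- A's fold over fresh, distinct keys appends the numbered key list to the dict's items. -/
theorem pvFold_items (T : List (Int × Int × Int)) (d : PySem.Dict (Int × Int × Int) Int) (c : Int)
    (hnd : T.Nodup) (hf : ∀ t ∈ T, d.contains t = false) :
    (T.foldl (fun (st : PySem.Dict (Int × Int × Int) Int × Int) k =>
        (st.1.insert k st.2, st.2 + 1)) (d, c)).1.items = d.items ++ pvNumbered T c := by
  induction T generalizing d c with
  | nil => simp [pvNumbered]
  | cons t ts ih =>
    simp only [List.foldl_cons]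
    have hdt : d.contains t = false := hf t (by simp)
    have step := ih (d.insert t c) (c + 1) (List.Nodup.of_cons hnd)
      (by
        intro t' ht'
        rw [PySem.Dict.contains_insert]
        have hne : t' ≠ t := by
          rintro rfl; exact (List.nodup_cons.mp hnd).1 ht'
        simp [hne, hf t' (List.mem_cons_of_mem _ ht')])
    rw [step, PySem.Dict.items_insert_of_not_contains d c hdt]
    simp [pvNumbered]

/-- B's fold, inserting key/value functions of the loop variable over distinct keys. -/
theorem pvFoldFn_items (T : List Int) (key : Int → Int × Int × Int) (val : Int → Int)
    (d : PySem.Dict (Int × Int × Int) Int)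
    (hnd : (T.map key).Nodup) (hf : ∀ t ∈ T, d.contains (key t) = false) :
    (T.foldl (fun (d : PySem.Dict (Int × Int × Int) Int) t => d.insert (key t) (val t)) d).items
      = d.items ++ T.map (fun t => (key t, val t)) := by
  induction T generalizing d with
  | nil => simp
  | cons t ts ih =>
    simp only [List.foldl_cons, List.map_cons] at *
    have hdt : d.contains (key t) = false := hf t (by simp)
    have step := ih (d.insert (key t) (val t)) (List.Nodup.of_cons hnd)
      (by
        intro t' ht'
        rw [PySem.Dict.contains_insert]
        have hne : key t' ≠ key t := by
          intro h; exact (List.nodup_cons.mp hnd).1 (h ▸ List.mem_map_of_mem ht')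
        simp [hne, hf t' (List.mem_cons_of_mem _ ht')])
    rw [step, PySem.Dict.items_insert_of_not_contains d (val t) hdt]
    simp

theorem pvNumbered_map_range (a b c : Int) {α : Type} (g : Int → α) :
    pvNumbered ((PySem.List.pyRange a b 1).map g) c
      = (PySem.List.pyRange a b 1).map (fun k => (g k, c + k - a)) := by
  by_cases h : b ≤ a
  · simp [PySem.List.pyRange_one_eq_nil h, pvNumbered]
  · push Not at h
    have hlen : ((b - (a + 1)).toNat) < ((b - a).toNat) := by omega
    rw [PySem.List.pyRange_one_cons h]
    simp only [List.map_cons, pvNumbered]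
    rw [pvNumbered_map_range (a + 1) b (c + 1) g]
    congr 1
    · simp
    · apply List.map_congr_left; intro k _; congr 1; ring
termination_by (b - a).toNat

/-- Rows are pairwise-distinct triples, so A never overwrites: the generated key list is Nodup. -/
theorem pvT_nodup (N : Int) :
    ((PySem.List.pyRange 1 (N + 1) 1).flatMap (fun i =>
      (PySem.List.pyRange 1 (N + 1) 1).flatMap (fun j =>
        (PySem.List.pyRange 1 (N + 1) 1).map (fun k => ((i, j, k) : Int × Int × Int))))).Nodup := by
  rw [List.nodup_flatMap]
  constructor
  · intro i _
    rw [List.nodup_flatMap]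
    constructor
    · intro j _
      exact (PySem.List.nodup_pyRange_one 1 (N + 1)).map (by intro k k' h; simpa using h)
    · apply List.Pairwise.imp ?_ (PySem.List.pairwise_lt_pyRange_one 1 (N + 1))
      intro j j' hlt x hx hx'
      simp only [List.mem_map] at hx hx'
      obtain ⟨k, _, rfl⟩ := hx
      obtain ⟨k', _, h⟩ := hx'
      have := congrArg (fun p => p.2.1) h
      simp at this; omega
  · apply List.Pairwise.imp ?_ (PySem.List.pairwise_lt_pyRange_one 1 (N + 1))
    intro i i' hlt x hx hx'
    simp only [List.mem_flatMap, List.mem_map] at hx hx'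
    obtain ⟨j, _, k, _, rfl⟩ := hx
    obtain ⟨j', _, k', _, h⟩ := hx'
    have := congrArg (fun p => p.1) h
    simp at this; omega

theorem pvNumbered_append {α : Type} (xs ys : List α) (c : Int) :
    pvNumbered (xs ++ ys) c = pvNumbered xs c ++ pvNumbered ys (c + xs.length) := by
  induction xs generalizing c with
  | nil => simp [pvNumbered]
  | cons x xs ih =>
    simp only [List.cons_append, pvNumbered, ih (c + 1), List.length_cons]
    congr 3
    push_cast; ring

/-- Numbering the middle (j) level: each row has length N, so row j starts at c + (j-a)*N. -/
theorem pvNumbered_mid (N : Int) (hN : 0 ≤ N) {α : Type} (g : Int → Int → α) (a c : Int) :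
    pvNumbered ((PySem.List.pyRange a (N + 1) 1).flatMap (fun j =>
        (PySem.List.pyRange 1 (N + 1) 1).map (g j))) c
      = (PySem.List.pyRange a (N + 1) 1).flatMap (fun j =>
          (PySem.List.pyRange 1 (N + 1) 1).map (fun k => (g j k, c + (j - a) * N + (k - 1)))) := by
  by_cases h : N + 1 ≤ a
  · simp [PySem.List.pyRange_one_eq_nil h, pvNumbered]
  · push Not at h
    have hlen : ((N + 1 - (a + 1)).toNat) < ((N + 1 - a).toNat) := by omega
    rw [PySem.List.pyRange_one_cons h]
    simp only [List.flatMap_cons]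
    rw [pvNumbered_append, pvNumbered_map_range 1 (N + 1) c (g a),
        pvNumbered_mid N hN g (a + 1) (c + ((PySem.List.pyRange 1 (N + 1) 1).map (g a)).length)]
    congr 1
    · apply List.map_congr_left; intro k _; congr 1; ring
    · apply List.flatMap_congr; intro j _
      apply List.map_congr_left; intro k _
      congr 1
      simp only [List.length_map, PySem.List.length_pyRange_one]
      have : ((N + 1 - 1).toNat : Int) = N := by omega
      rw [this]; ring
termination_by (N + 1 - a).toNat

/-- Numbering the outer (i) level: each i-block has length N*N. -/
theorem pvNumbered_top (N : Int) (hN : 0 ≤ N) (a c : Int) :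
    pvNumbered ((PySem.List.pyRange a (N + 1) 1).flatMap (fun i =>
        (PySem.List.pyRange 1 (N + 1) 1).flatMap (fun j =>
          (PySem.List.pyRange 1 (N + 1) 1).map (fun k => ((i, j, k) : Int × Int × Int))))) c
      = (PySem.List.pyRange a (N + 1) 1).flatMap (fun i =>
          (PySem.List.pyRange 1 (N + 1) 1).flatMap (fun j =>
            (PySem.List.pyRange 1 (N + 1) 1).map (fun k =>
              (((i, j, k) : Int × Int × Int), c + (i - a) * (N * N) + (j - 1) * N + (k - 1))))) := by
  by_cases h : N + 1 ≤ a
  · simp [PySem.List.pyRange_one_eq_nil h, pvNumbered]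
  · push Not at h
    have hlen : ((N + 1 - (a + 1)).toNat) < ((N + 1 - a).toNat) := by omega
    rw [PySem.List.pyRange_one_cons h]
    simp only [List.flatMap_cons]
    have hblk : (((PySem.List.pyRange 1 (N + 1) 1).flatMap (fun j =>
        (PySem.List.pyRange 1 (N + 1) 1).map (fun k => ((a, j, k) : Int × Int × Int)))).length : Int)
        = N * N := by
      rw [List.length_flatMap]
      have : ∀ j : Int, ((PySem.List.pyRange 1 (N + 1) 1).map
          (fun k => ((a, j, k) : Int × Int × Int))).length = (N + 1 - 1).toNat := by
        intro j; simp [PySem.List.length_pyRange_one]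
      have h1 : ((N + 1 - 1).toNat : Int) = N := by omega
      rw [List.map_congr_left (fun j _ => this j), List.map_const', List.sum_replicate,
        smul_eq_mul, PySem.List.length_pyRange_one]
      push_cast
      rw [h1]
    rw [pvNumbered_append, pvNumbered_mid N hN (fun j k => ((a, j, k) : Int × Int × Int)) 1 c,
        pvNumbered_top N hN (a + 1) _]
    congr 1
    · apply List.flatMap_congr; intro j _
      apply List.map_congr_left; intro k _; congr 1; ring
    · apply List.flatMap_congr; intro i _
      apply List.flatMap_congr; intro j _
      apply List.map_congr_left; intro k _
      congr 1
      rw [hblk]; ring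
termination_by (N + 1 - a).toNat

/-- Splitting a multiple-length range into blocks of length n. -/
theorem pvRange_split (a m n : Int) (hn : 0 ≤ n) :
    PySem.List.pyRange (a * n) (m * n) 1
      = (PySem.List.pyRange a m 1).flatMap (fun q =>
          (PySem.List.pyRange 0 n 1).map (fun r => q * n + r)) := by
  by_cases h : m ≤ a
  · rw [PySem.List.pyRange_one_eq_nil (by nlinarith), PySem.List.pyRange_one_eq_nil h]
    simp
  · push Not at h
    have hlen : ((m - (a + 1)).toNat) < ((m - a).toNat) := by omega
    rw [PySem.List.pyRange_one_cons h, List.flatMap_cons,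
        PySem.List.pyRange_one_append (a * n) ((a + 1) * n) (m * n)
          (by nlinarith) (by nlinarith),
        show (a + 1) * n = (a + 1) * n from rfl]
    congr 1
    · rw [PySem.List.pyRange_one, PySem.List.pyRange_one]
      have : ((a + 1) * n - a * n) = n := by ring
      rw [this]
      simp
    · have := pvRange_split (a + 1) m n hn
      rw [this]
termination_by (m - a).toNat

/-- divmod decoding of q*n + r for 0 ≤ r < n. -/
theorem pvDivmod_decode (q r n : Int) (hn : 0 < n) (h0 : 0 ≤ r) (hr : r < n) :
    PySem.Int.floordiv (q * n + r) n = q ∧ PySem.Int.mod (q * n + r) n = r := by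
  have hf : PySem.Int.floordiv (q * n + r) n = q := by
    rw [PySem.Int.floordiv_eq_iff_of_pos hn]
    constructor <;> nlinarith
  refine ⟨hf, ?_⟩
  have := PySem.Int.floordiv_mul_add_mod (q * n + r) n
  rw [hf] at this
  omega

/-- Shift: range(1, N+1) is range(0, N) with 1 added. -/
theorem pvShift (N : Int) :
    PySem.List.pyRange 1 (N + 1) 1 = (PySem.List.pyRange 0 N 1).map (fun x => x + 1) := by
  rw [PySem.List.pyRange_one, PySem.List.pyRange_one]
  have : (N + 1 - 1).toNat = (N - 0).toNat := by omega
  rw [this, List.map_map]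
  apply List.map_congr_left
  intro k _
  simp [Function.comp]
  omega

-- ===== VERDICT (by name: the statement is the Claim_ definition above) =====
theorem makeMapping_spec : Claim_equal_makeMapping := by
  intro N _
  unfold Spec_makeMapping makeMapping makeMapping_alt
  by_cases hN0 : N ≤ 0
  · rw [PySem.List.pyRange_one_eq_nil (show N + 1 ≤ 1 by omega),
        PySem.List.pyRange_one_eq_nil (show N * N * N ≤ 0 by nlinarith [mul_self_nonneg N])]
    simp [PySem.Dict.empty]
  · push Not at hN0
    have hN : 0 ≤ N := le_of_lt hN0
    -- ===== A side: nested folds → numbered flatMap closed form =====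
    rw [show (fun (st : PySem.Dict (Int × Int × Int) Int × Int) i =>
        (PySem.List.pyRange 1 (N + 1) 1).foldl (fun st j =>
          (PySem.List.pyRange 1 (N + 1) 1).foldl
            (fun (st : PySem.Dict (Int × Int × Int) Int × Int) k =>
              (st.1.insert (i, j, k) st.2, st.2 + 1)) st) st)
      = (fun (st : PySem.Dict (Int × Int × Int) Int × Int) i =>
          ((PySem.List.pyRange 1 (N + 1) 1).flatMap (fun j =>
            (PySem.List.pyRange 1 (N + 1) 1).map (fun k => ((i, j, k) : Int × Int × Int)))).foldl
            (fun st t => (st.1.insert t st.2, st.2 + 1)) st) from by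
        funext st i
        rw [List.foldl_flatMap]
        congr 1
        funext acc j
        rw [List.foldl_map]]
    rw [show ((PySem.List.pyRange 1 (N + 1) 1).foldl (fun (st : PySem.Dict (Int × Int × Int) Int × Int) i =>
          ((PySem.List.pyRange 1 (N + 1) 1).flatMap (fun j =>
            (PySem.List.pyRange 1 (N + 1) 1).map (fun k => ((i, j, k) : Int × Int × Int)))).foldl
            (fun st t => (st.1.insert t st.2, st.2 + 1)) st) (PySem.Dict.empty, 1))
      = (((PySem.List.pyRange 1 (N + 1) 1).flatMap (fun i =>
          (PySem.List.pyRange 1 (N + 1) 1).flatMap (fun j =>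
            (PySem.List.pyRange 1 (N + 1) 1).map (fun k => ((i, j, k) : Int × Int × Int))))).foldl
            (fun st t => (st.1.insert t st.2, st.2 + 1)) (PySem.Dict.empty, 1)) from
        (List.foldl_flatMap).symm]
    rw [pvFold_items _ PySem.Dict.empty 1 (pvT_nodup N) (by intro t _; simp),
        pvNumbered_top N hN 1 1]
    -- ===== B side: fold of inserts → map of decoded literals =====
    rw [show (fun (d : PySem.Dict (Int × Int × Int) Int) t =>
        let q := PySem.Int.floordiv t N
        let k := PySem.Int.mod t N
        let i := PySem.Int.floordiv q N
        let j := PySem.Int.mod q N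
        d.insert (i + 1, j + 1, k + 1) (t + 1))
      = (fun (d : PySem.Dict (Int × Int × Int) Int) t =>
          d.insert ((fun t => (PySem.Int.floordiv (PySem.Int.floordiv t N) N + 1,
            PySem.Int.mod (PySem.Int.floordiv t N) N + 1, PySem.Int.mod t N + 1)) t)
            ((fun t : Int => t + 1) t)) from rfl]
    have hkeyinj : Function.Injective (fun t : Int =>
        (PySem.Int.floordiv (PySem.Int.floordiv t N) N + 1,
          PySem.Int.mod (PySem.Int.floordiv t N) N + 1, PySem.Int.mod t N + 1)) := by
      intro t t' h
      simp only [Prod.mk.injEq] at h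
      obtain ⟨h1, h2, h3⟩ := h
      have e1 := PySem.Int.floordiv_mul_add_mod t N
      have e2 := PySem.Int.floordiv_mul_add_mod t' N
      have e3 := PySem.Int.floordiv_mul_add_mod (PySem.Int.floordiv t N) N
      have e4 := PySem.Int.floordiv_mul_add_mod (PySem.Int.floordiv t' N) N
      have hA : PySem.Int.floordiv (PySem.Int.floordiv t N) N
          = PySem.Int.floordiv (PySem.Int.floordiv t' N) N := by omega
      have hB : PySem.Int.mod (PySem.Int.floordiv t N) N
          = PySem.Int.mod (PySem.Int.floordiv t' N) N := by omega
      rw [hA, hB] at e3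
      have hq : PySem.Int.floordiv t N = PySem.Int.floordiv t' N := by linarith
      rw [hq] at e1
      linarith
    rw [pvFoldFn_items (PySem.List.pyRange 0 (N * N * N) 1) _ _ PySem.Dict.empty
        ((PySem.List.nodup_pyRange_one 0 (N * N * N)).map hkeyinj) (by intro t _; simp)]
    -- split the flat range into coordinate blocks
    have hsplit1 : PySem.List.pyRange 0 (N * N * N) 1
        = (PySem.List.pyRange 0 (N * N) 1).flatMap (fun q =>
            (PySem.List.pyRange 0 N 1).map (fun r => q * N + r)) := by
      have h := pvRange_split 0 (N * N) N hN
      rw [zero_mul] at h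
      exact h
    have hsplit2 : PySem.List.pyRange 0 (N * N) 1
        = (PySem.List.pyRange 0 N 1).flatMap (fun i =>
            (PySem.List.pyRange 0 N 1).map (fun j => i * N + j)) := by
      have h := pvRange_split 0 N N hN
      rw [zero_mul] at h
      exact h
    rw [hsplit1, hsplit2, pvShift N]
    simp only [PySem.Dict.empty, List.nil_append, List.map_flatMap, List.map_map,
      List.flatMap_assoc, List.flatMap_map]
    apply List.flatMap_congr; intro i0 hi0
    apply List.flatMap_congr; intro j0 hj0
    apply List.map_congr_left; intro k0 hk0
    rw [PySem.List.mem_pyRange_one] at hi0 hj0 hk0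
    have dk := pvDivmod_decode (i0 * N + j0) k0 N hN0 hk0.1 hk0.2
    have dq := pvDivmod_decode i0 j0 N hN0 hj0.1 hj0.2
    simp only [Function.comp_apply, dk.1, dk.2, dq.1, dq.2, Prod.mk.injEq]
    refine ⟨by trivial, by trivial, by trivial, by ring⟩
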